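-- pv_equiv track=rewrite | github.com/avarobinson/cureMetrixSample | questions.py | chessboard
-- ===== SOURCE A (Python) =====
-- def chessboard(movements):
--     """
--     :param movements: a list of list of movements with each inner list containing the direction and the number of spaces moved
--     :return: the distance traveled by the Rook and how far away the Rook is from starting point
--     """
--     x = 0
--     y = 0
--     distance = 0
--     for move in movements:
--         direction = move[0]
--         amount = move[1]
--         distance += amount
--         if direction == "up":
--             y += amount
--         elif direction == "down":
--             y -= amount
--         elif direction == "right":
--             x += amount
--         elif direction == "left":
--             x -= amount
--
--     fromStart = abs(x) + abs(y)
--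
--     return "Total distance traveled: " + str(distance) + "\nSpaces away from start: " + str(fromStart)
-- ===== SOURCE B (Python) =====
-- def chessboard(movements):
--     def along(d):
--         return sum(a for dd, a in movements if dd == d)
--     distance = sum(a for _, a in movements)
--     fromStart = (abs(along("right") - along("left"))
--                  + abs(along("up") - along("down")))
--     return "Total distance traveled: " + str(distance) + "\nSpaces away from start: " + str(fromStart)
-- ===== Notes on version B (the rewrite author's own statement) =====
-- stated objective: alternative
-- what changed: B drops A's single pass with running (x,y,distance) state entirely: it computes the answer declaratively from five independent stateless passes (one sum of all amounts, and one filtered sum per direction keyword) combined after the fact.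
import Mathlib
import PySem

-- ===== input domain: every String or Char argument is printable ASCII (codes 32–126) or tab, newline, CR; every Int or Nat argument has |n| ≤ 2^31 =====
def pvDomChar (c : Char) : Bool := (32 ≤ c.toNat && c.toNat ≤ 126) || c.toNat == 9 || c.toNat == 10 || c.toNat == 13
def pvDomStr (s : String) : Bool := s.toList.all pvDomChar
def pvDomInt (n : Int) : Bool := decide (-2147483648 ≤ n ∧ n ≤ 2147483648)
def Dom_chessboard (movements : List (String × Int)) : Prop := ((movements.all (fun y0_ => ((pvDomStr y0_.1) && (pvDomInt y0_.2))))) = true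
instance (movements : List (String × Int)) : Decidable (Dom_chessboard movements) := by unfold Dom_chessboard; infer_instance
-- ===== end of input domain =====

-- B replaces A's single stateful pass (running x, y, distance) by five independent stateless
-- filtered sums combined afterwards; same O(n) cost, different decomposition.

-- ===== PORT A =====
-- A's loop as a fold over the state (x, y, distance); branch order as in the Python.
def chessboard (movements : List (String × Int)) : String :=
  let st := movements.foldl (fun (s : Int × Int × Int) move =>
    let x := s.1
    let y := s.2.1
    let distance := s.2.2
    let direction := move.1
    let amount := move.2
    let distance := distance + amount
    if direction = "up" then (x, y + amount, distance)
    else if direction = "down" then (x, y - amount, distance)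
    else if direction = "right" then (x + amount, y, distance)
    else if direction = "left" then (x - amount, y, distance)
    else (x, y, distance)) (0, 0, 0)
  let fromStart := |st.1| + |st.2.1|
  "Total distance traveled: " ++ PySem.Int.toStr st.2.2 ++ "\nSpaces away from start: " ++ PySem.Int.toStr fromStart

-- ===== PORT B =====
-- helper 'along': sum(a for dd, a in movements if dd == d), as filter-then-map-then-sum
def chessboardAlong (movements : List (String × Int)) (d : String) : Int :=
  ((movements.filter (fun m => m.1 = d)).map (·.2)).sum

def chessboard_alt (movements : List (String × Int)) : String :=
  let distance := (movements.map (·.2)).sum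
  let fromStart := |chessboardAlong movements "right" - chessboardAlong movements "left"|
                 + |chessboardAlong movements "up" - chessboardAlong movements "down"|
  "Total distance traveled: " ++ PySem.Int.toStr distance ++ "\nSpaces away from start: " ++ PySem.Int.toStr fromStart

-- ===== PRECONDITION & SPEC =====
def Spec_chessboard (movements : List (String × Int)) (out : String) : Prop := out = chessboard_alt movements
instance (movements : List (String × Int)) (out : String) : Decidable (Spec_chessboard movements out) := by unfold Spec_chessboard; infer_instance

-- ===== CLAIM (what is proved, stated in full; the proofs are below) =====
def Claim_equal_chessboard : Prop := ∀ (movements : List (String × Int)), Dom_chessboard movements → Spec_chessboard movements (chessboard movements)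

-- ===== LEMMAS AND PROOFS =====

lemma afold_char (ms : List (String × Int)) : ∀ x y d : Int,
    ms.foldl (fun (s : Int × Int × Int) move =>
      let x := s.1
      let y := s.2.1
      let distance := s.2.2
      let direction := move.1
      let amount := move.2
      let distance := distance + amount
      if direction = "up" then (x, y + amount, distance)
      else if direction = "down" then (x, y - amount, distance)
      else if direction = "right" then (x + amount, y, distance)
      else if direction = "left" then (x - amount, y, distance)
      else (x, y, distance)) (x, y, d)
    = (x + chessboardAlong ms "right" - chessboardAlong ms "left",
       y + chessboardAlong ms "up" - chessboardAlong ms "down",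
       d + (ms.map (·.2)).sum) := by
  induction ms with
  | nil => intro x y d; simp [chessboardAlong]
  | cons m ms ih =>
    intro x y d
    simp only [List.foldl_cons]
    by_cases h1 : m.1 = "up"
    · simp [h1, ih, chessboardAlong]; exact ⟨by ring, by ring⟩
    · by_cases h2 : m.1 = "down"
      · simp [h2, ih, chessboardAlong]; exact ⟨by ring, by ring⟩
      · by_cases h3 : m.1 = "right"
        · simp [h3, ih, chessboardAlong]; exact ⟨by ring, by ring⟩
        · by_cases h4 : m.1 = "left"
          · simp [h4, ih, chessboardAlong]; exact ⟨by ring, by ring⟩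
          · simp [h1, h2, h3, h4, ih, chessboardAlong]; ring

-- ===== VERDICT (by name: the statement is the Claim_ definition above) =====
theorem chessboard_spec : Claim_equal_chessboard := by
  intro ms _
  show chessboard ms = chessboard_alt ms
  unfold chessboard chessboard_alt
  simp [afold_char]
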